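-- pv_equiv track=rewrite | github.com/Snoblomma/HackerRank | Mathematics/Number Theory/Sherlock and GCD/Sherlock and GCD.py | solve
-- ===== SOURCE A (Python) =====
-- def computeGCD(x, y):
--    while(y):
--        x, y = y, x % y
--    return x
--
-- def solve(a):
--     s = set(a)
--     if len(s) > 1:
--         if 1 in s:
--             return 'YES'
--         else:
--             gcd = computeGCD(a[0], a[1])
--
--             for i in range(2, len(a)):
--                 gcd = computeGCD(gcd, a[i])
--
--             if gcd == 1:
--                 return 'YES'
--
--             else:
--                 for x in s:
--                     for y in s:
--                         if x != y:
--                             gcd = computeGCD(x, y)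
--                             if gcd == 1:
--                                 return 'YES'
--     else:
--         return 'NO'
--
--     return 'NO'
-- ===== SOURCE B (Python) =====
-- def computeGCD(x, y):
--     while(y):
--         x, y = y, x % y
--     return x
--
-- def solve(a):
--     # A subset with GCD 1 exists iff the GCD of all |values| is 1.
--     g = 0
--     for v in a:
--         g = computeGCD(g, abs(v))
--     return 'YES' if g == 1 else 'NO'
-- ===== Notes on version B (the rewrite author's own statement) =====
-- stated objective: simpler
-- what changed: A's staged set checks, signed whole-array gcd fold and nested pairwise rescan over the distinct values are replaced by a single linear fold of gcd over absolute values with 'YES' iff it is 1, the textbook criterion for a subset with gcd 1.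
-- intended difference: On inputs whose overall gcd of absolute values is 1 but which are a single repeated value (so +-1), or contain no 1, end their nonzero entries with a negative value and have no distinct pair (x,y) with y>0 and gcd(|x|,|y|)=1, A's sign-sensitive Euclid and set guards make it return 'NO' although the whole array is a subset with gcd 1; B returns the intended 'YES'. — e.g. on solve([-2, -3]): A returns "NO", B returns "YES"
import Mathlib
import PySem

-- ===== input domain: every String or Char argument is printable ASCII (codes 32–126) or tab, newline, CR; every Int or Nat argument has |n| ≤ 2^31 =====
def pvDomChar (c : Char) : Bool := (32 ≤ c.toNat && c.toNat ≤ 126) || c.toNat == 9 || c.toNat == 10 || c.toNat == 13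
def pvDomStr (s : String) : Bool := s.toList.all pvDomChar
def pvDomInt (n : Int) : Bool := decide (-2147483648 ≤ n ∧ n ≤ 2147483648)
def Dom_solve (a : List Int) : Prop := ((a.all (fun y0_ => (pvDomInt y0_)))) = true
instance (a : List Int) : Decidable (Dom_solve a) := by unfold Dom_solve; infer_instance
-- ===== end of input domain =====

-- B replaces A's staged set checks, signed whole-array gcd fold and nested pairwise rescan by a
-- single linear fold of gcd over absolute values ('YES' iff it is 1); on the D_ inputs below A
-- returns 'NO' although a subset with gcd 1 exists, and B returns the intended 'YES'.

-- ===== PORT A =====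

theorem pymod_natAbs_lt (x y : Int) (hy : y ≠ 0) : (PySem.Int.mod x y).natAbs < y.natAbs := by
  rcases lt_or_gt_of_ne hy with h | h
  · have h1 := PySem.Int.mod_neg_bounds x h
    omega
  · have h1 := PySem.Int.mod_nonneg x h
    have h2 := PySem.Int.mod_lt x h
    omega

def computeGCD (x y : Int) : Int :=
  if hy : y = 0 then x else computeGCD y (PySem.Int.mod x y)
termination_by y.natAbs
decreasing_by exact pymod_natAbs_lt x y hy

def solve (a : List Int) : String :=
  let s := PySem.Set.ofList a
  if 1 < s.length then
    if s.contains 1 then "YES"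
    else
      -- a[0] and a[1] are in range here (len(set(a)) > 1 forces len(a) ≥ 2): the default is never used
      let g0 := computeGCD (PySem.List.pyGetD a 0 0) (PySem.List.pyGetD a 1 0)
      let g := (PySem.List.pyRange 2 (a.length : Int) 1).foldl
        (fun acc i => computeGCD acc (PySem.List.pyGetD a i 0)) g0
      if g = 1 then "YES"
      else if s.any (fun x => s.any (fun y => decide (x ≠ y) && decide (computeGCD x y = 1))) then "YES"
      else "NO"
  else "NO"

-- ===== PORT B =====

def solve_alt (a : List Int) : String :=
  let g := a.foldl (fun g v => computeGCD g (v.natAbs : Int)) 0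
  if g = 1 then "YES" else "NO"

-- ===== PRECONDITION & SPEC =====

-- On inputs whose overall gcd of absolute values is 1 but which are a single repeated value (so
-- ±1), or contain no 1, end their nonzero entries with a negative value and have no pair (x,y)
-- with y>0 and gcd(x,y)=1, A's sign-sensitive Euclid and set guards make it return 'NO'
-- although the whole array is a subset with gcd 1; B returns the intended 'YES'.
def D_solve (a : List Int) : Prop :=
  a.foldr gcd 0 = 1 ∧
    (a.all (· == 1) ∨
      1 ∉ a ∧ (a.filter (· ≠ 0)).getLastD 0 < 0 ∧
        ∀ x ∈ a, ∀ y ∈ a, 0 < y → x.gcd y ≠ 1)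

instance (a : List Int) : Decidable (D_solve a) := by unfold D_solve; infer_instance

def Spec_solve (a : List Int) (out : String) : Prop := ¬ D_solve a → out = solve_alt a
instance (a : List Int) (out : String) : Decidable (Spec_solve a out) := by unfold Spec_solve; infer_instance

def pvDiffWitness_solve : List Int := [-2, -3]
def pvDiffWitnessOut_solve : String × String := ("NO", "YES")

-- ===== CLAIM (what is proved, stated in full; the proofs are below) =====
def Claim_unchanged_solve : Prop := ∀ (a : List Int), Dom_solve a → Spec_solve a (solve a)
def Claim_changed_solve : Prop := Dom_solve (pvDiffWitness_solve) ∧ D_solve (pvDiffWitness_solve) ∧ solve (pvDiffWitness_solve) = pvDiffWitnessOut_solve.1 ∧ solve_alt (pvDiffWitness_solve) = pvDiffWitnessOut_solve.2 ∧ pvDiffWitnessOut_solve.1 ≠ pvDiffWitnessOut_solve.2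
def Claim_exact_solve : Prop := ∀ (a : List Int), Dom_solve a → D_solve a → solve a ≠ solve_alt a

-- ===== LEMMAS AND PROOFS =====

def NG (t : List Int) (g : Nat) : Nat := t.foldl (fun g v => Nat.gcd v.natAbs g) g

def LF (t : List Int) (l : Int) : Int := t.foldl (fun l v => if v ≠ 0 then v else l) l

def PairP (a : List Int) : Prop :=
  ∃ x ∈ a, ∃ y ∈ a, x ≠ y ∧ 0 < y ∧ Nat.gcd x.natAbs y.natAbs = 1

theorem computeGCD_zero_right (x : Int) : computeGCD x 0 = x := by
  unfold computeGCD; simp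

theorem gcd_pymod (x y : Int) : Int.gcd y (PySem.Int.mod x y) = Int.gcd x y := by
  have hm : PySem.Int.mod x y = x + (-(PySem.Int.floordiv x y)) * y := by
    have := PySem.Int.floordiv_mul_add_mod x y; ring_nf; omega
  rw [hm, Int.gcd_add_mul_right_right, Int.gcd_comm]

theorem computeGCD_pos_aux : ∀ (n : Nat) (x y : Int), y.natAbs ≤ n → 0 < y →
    computeGCD x y = (Int.gcd x y : Int) := by
  intro n
  induction n with
  | zero => intro x y h hy; omega
  | succ n ih =>
    intro x y h hy
    rw [computeGCD, dif_neg (by omega)]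
    rcases eq_or_lt_of_le (PySem.Int.mod_nonneg x hy) with hm | hm
    · rw [← hm, computeGCD_zero_right]
      have hdvd : y ∣ x := (PySem.Int.mod_eq_zero_iff_dvd x y).mp hm.symm
      rw [Int.gcd_eq_natAbs_right_iff_dvd.mpr hdvd, Int.natAbs_of_nonneg (by omega)]
    · have hlt := pymod_natAbs_lt x y (by omega)
      rw [ih y (PySem.Int.mod x y) (by omega) hm, gcd_pymod]

theorem computeGCD_pos (x y : Int) (hy : 0 < y) : computeGCD x y = (Int.gcd x y : Int) :=
  computeGCD_pos_aux y.natAbs x y le_rfl hy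

theorem computeGCD_neg_aux : ∀ (n : Nat) (x y : Int), y.natAbs ≤ n → y < 0 →
    computeGCD x y = -(Int.gcd x y : Int) := by
  intro n
  induction n with
  | zero => intro x y h hy; omega
  | succ n ih =>
    intro x y h hy
    rw [computeGCD, dif_neg (by omega)]
    have hb := PySem.Int.mod_neg_bounds x hy
    rcases eq_or_lt_of_le hb.2 with hm | hm
    · rw [hm, computeGCD_zero_right]
      have hdvd : y ∣ x := (PySem.Int.mod_eq_zero_iff_dvd x y).mp hm
      rw [Int.gcd_eq_natAbs_right_iff_dvd.mpr hdvd]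
      omega
    · have hlt := pymod_natAbs_lt x y (by omega)
      rw [ih y (PySem.Int.mod x y) (by omega) hm, gcd_pymod]

theorem computeGCD_natCast (m n : Nat) : computeGCD (m : Int) (n : Int) = (Nat.gcd m n : Int) := by
  rcases Nat.eq_zero_or_pos n with hn | hn
  · subst hn; rw [Int.ofNat_zero, computeGCD_zero_right]; simp
  · rw [computeGCD_pos _ _ (by exact_mod_cast hn), Int.gcd_natCast_natCast]

theorem LF_char : ∀ (t : List Int) (l0 : Int), LF t l0 = if LF t 0 = 0 then l0 else LF t 0 := by
  intro t
  induction t with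
  | nil => intro l0; simp [LF]
  | cons v t ih =>
    intro l0
    simp only [LF, List.foldl_cons] at *
    rcases eq_or_ne v 0 with hv | hv
    · have hnv : ¬ (v ≠ 0) := by simp [hv]
      rw [if_neg hnv, if_neg hnv]
      exact ih l0
    · rw [if_pos hv, if_pos hv, ih v]
      by_cases h : List.foldl (fun l v => if v ≠ 0 then v else l) 0 t = 0
      · simp only [if_pos h]
        rw [if_neg hv]
      · simp only [if_neg h]

theorem LF_ne_zero (t : List Int) (v : Int) (hv : v ≠ 0) : LF t v ≠ 0 := by
  rw [LF_char t v]
  by_cases h : LF t 0 = 0 <;> simp [h, hv]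

theorem LF_zero_iff : ∀ (t : List Int), LF t 0 = 0 ↔ ∀ w ∈ t, w = 0 := by
  intro t
  induction t with
  | nil => simp [LF]
  | cons v t ih =>
    constructor
    · intro h w hw
      rcases eq_or_ne v 0 with hv | hv
      · have h' : LF t 0 = 0 := by
          simpa only [LF, List.foldl_cons, if_neg (by simp [hv] : ¬ v ≠ 0)] using h
        rcases List.mem_cons.mp hw with h1 | h1
        · exact h1 ▸ hv
        · exact ih.mp h' w h1
      · exfalso
        have : LF t v = 0 := by
          simpa only [LF, List.foldl_cons, if_pos hv] using h
        exact LF_ne_zero t v hv this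
    · intro h
      have hv := h v (List.mem_cons_self ..)
      have ht : LF t 0 = 0 := ih.mpr (fun w hw => h w (List.mem_cons_of_mem _ hw))
      simp only [LF, List.foldl_cons, if_neg (by simp [hv] : ¬ v ≠ 0)]
      exact ht

theorem NG_all_zero : ∀ (t : List Int) (g : Nat), (∀ w ∈ t, w = 0) → NG t g = g := by
  intro t
  induction t with
  | nil => intro g _; rfl
  | cons v t ih =>
    intro g h
    simp only [NG, List.foldl_cons] at *
    rw [h v (List.mem_cons_self ..), Int.natAbs_zero, Nat.gcd_zero_left]
    exact ih g (fun w hw => h w (List.mem_cons_of_mem _ hw))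

theorem NG_gcd_out : ∀ (t : List Int) (g : Nat), NG t g = Nat.gcd (NG t 0) g := by
  intro t
  induction t with
  | nil => intro g; simp [NG]
  | cons v t ih =>
    intro g
    simp only [NG, List.foldl_cons] at *
    rw [ih (Nat.gcd v.natAbs g), ih (Nat.gcd v.natAbs 0)]
    simp [Nat.gcd_assoc, Nat.gcd_comm]

theorem foldr_gcd : ∀ (a : List Int), a.foldr gcd 0 = ((NG a 0 : Nat) : Int) := by
  intro a
  induction a with
  | nil => simp [NG]
  | cons v t ih =>
    simp only [List.foldr_cons, ih]
    rw [← Int.coe_gcd]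
    have h1 : Int.gcd v ((NG t 0 : Nat) : Int) = Nat.gcd v.natAbs (NG t 0) := by
      unfold Int.gcd
      rw [Int.natAbs_natCast]
    rw [h1]
    show _ = ((NG t (Nat.gcd v.natAbs 0) : Nat) : Int)
    rw [NG_gcd_out t (Nat.gcd v.natAbs 0)]
    simp [Nat.gcd_comm]

theorem LF_filter : ∀ (a : List Int), LF a 0 = (a.filter (· ≠ 0)).getLastD 0 := by
  intro a
  induction a with
  | nil => rfl
  | cons v t ih =>
    rcases eq_or_ne v 0 with hv | hv
    · subst hv
      have h1 : LF ((0:Int) :: t) 0 = LF t 0 := by simp [LF]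
      rw [h1, ih]
      simp
    · have h1 : LF (v :: t) 0 = LF t v := by simp [LF, hv]
      have h2 : (List.filter (fun x => decide (x ≠ 0)) (v :: t)) = v :: t.filter fun x => decide (x ≠ 0) := by
        simp [hv]
      rw [h1, LF_char t v, h2, List.getLastD_cons]
      by_cases h0 : LF t 0 = 0
      · rw [if_pos h0]
        have hf : t.filter (fun x => decide (x ≠ 0)) = [] := by
          rw [List.filter_eq_nil_iff]
          intro w hw
          simpa using (LF_zero_iff t).mp h0 w hw
        rw [hf]
        rfl
      · rw [if_neg h0, ih]
        rw [ih] at h0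
        rcases hf : t.filter (fun x => decide (x ≠ 0)) with _ | ⟨w, l⟩
        · rw [hf] at h0; exact absurd rfl h0
        · rcases hl : (w :: l).getLast? with _ | x
          · simp at hl
          · simp [List.getLastD, hl]

theorem LF_mem : ∀ (t : List Int) (l : Int), LF t l = l ∨ LF t l ∈ t := by
  intro t
  induction t with
  | nil => intro l; exact Or.inl rfl
  | cons v t ih =>
    intro l
    have h : LF (v :: t) l = LF t (if v ≠ 0 then v else l) := by simp [LF]
    rw [h]
    rcases ih (if v ≠ 0 then v else l) with h1 | h1
    · rw [h1]
      split_ifs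
      · exact Or.inr (List.mem_cons_self ..)
      · exact Or.inl rfl
    · exact Or.inr (List.mem_cons_of_mem _ h1)

theorem NG_const : ∀ (t : List Int) (v : Int), (∀ x ∈ t, x = v) →
    NG t 0 = 0 ∨ NG t 0 = v.natAbs := by
  intro t
  induction t with
  | nil => intro v _; exact Or.inl rfl
  | cons w t ih =>
    intro v h
    have hw : w = v := h w (List.mem_cons_self ..)
    have hNG : NG (w :: t) 0 = Nat.gcd (NG t 0) w.natAbs := by
      show NG t (Nat.gcd w.natAbs 0) = _
      rw [NG_gcd_out]
      simp [Nat.gcd_comm]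
    rcases ih v (fun x hx => h x (List.mem_cons_of_mem _ hx)) with h1 | h1 <;>
      rw [hNG, h1, hw] <;> simp

theorem D_iff (a : List Int) :
    D_solve a ↔ NG a 0 = 1 ∧
      ((∀ x ∈ a, ∀ y ∈ a, x = y) ∨ ((1 : Int) ∉ a ∧ LF a 0 < 0 ∧ ¬ PairP a)) := by
  unfold D_solve PairP
  rw [foldr_gcd, ← LF_filter]
  have hcast : ((NG a 0 : Nat) : Int) = 1 ↔ NG a 0 = 1 := by omega
  have hall : (a.all (· == 1)) = true ↔ ∀ x ∈ a, x = 1 := by simp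
  rw [hcast, hall]
  have hgcd : ∀ x y : Int, x.gcd y = Nat.gcd x.natAbs y.natAbs := fun _ _ => rfl
  constructor
  · rintro ⟨hg, h⟩
    refine ⟨hg, ?_⟩
    rcases h with h | ⟨h1, hlf, hp⟩
    · exact Or.inl (fun x hx y hy => (h x hx).trans (h y hy).symm)
    · refine Or.inr ⟨h1, hlf, ?_⟩
      rintro ⟨x, hx, y, hy, -, hy0, hxy⟩
      exact hp x hx y hy hy0 (by rw [hgcd]; exact hxy)
  · rintro ⟨hg, h⟩
    refine ⟨hg, ?_⟩
    rcases h with h | ⟨h1, hlf, hp⟩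
    · -- all elements equal; overall gcd 1 forces them all 1 or all -1
      rcases ha : a with _ | ⟨v, t⟩
      · rw [ha] at hg; exact absurd hg (by decide)
      rw [ha] at h hg
      have hall' : ∀ x ∈ (v :: t), x = v :=
        fun x hx => h x hx v (List.mem_cons_self ..)
      rcases NG_const (v :: t) v hall' with h0 | h0
      · rw [h0] at hg; exact absurd hg (by decide)
      · have hv : v = 1 ∨ v = -1 := by
          rw [h0] at hg; omega
        rcases hv with hv | hv
        · exact Or.inl (fun x hx => (hall' x hx).trans hv)
        · refine Or.inr ⟨?_, ?_, ?_⟩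
          · intro hmem
            have := hall' 1 hmem
            omega
          · have hLF0 : LF (v :: t) 0 ≠ 0 := by
              intro h0'
              have := (LF_zero_iff _).mp h0' v (List.mem_cons_self ..)
              omega
            rcases LF_mem (v :: t) 0 with he | he
            · exact absurd he hLF0
            · have := hall' _ he
              omega
          · intro x hx y hy hy0
            have := hall' y hy
            omega
    · refine Or.inr ⟨h1, hlf, ?_⟩
      intro x hx y hy hy0 hxy
      by_cases hne : x = y
      · subst hne
        have h2 : x.natAbs = 1 := by
          rw [hgcd] at hxy; simpa using hxy
        have h3 : x = 1 := by omega
        exact h1 (h3 ▸ hx)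
      · exact hp ⟨x, hx, y, hy, hne, hy0, by rw [← hgcd]; exact hxy⟩

theorem foldA_char : ∀ (t : List Int) (x : Int),
    List.foldl computeGCD x t =
      if LF t 0 = 0 then x
      else if 0 < LF t 0 then ((NG t x.natAbs : Nat) : Int) else -((NG t x.natAbs : Nat) : Int) := by
  intro t
  induction t with
  | nil => intro x; simp [LF]
  | cons v t ih =>
    intro x
    simp only [List.foldl_cons]
    rcases eq_or_ne v 0 with hv | hv
    · rw [hv, computeGCD_zero_right, ih x]
      have h1 : LF ((0:Int) :: t) 0 = LF t 0 := by simp [LF]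
      have h2 : NG ((0:Int) :: t) x.natAbs = NG t x.natAbs := by simp [NG]
      rw [h1, h2]
    · have hLF : LF (v :: t) 0 = if LF t 0 = 0 then v else LF t 0 := by
        have h1 := LF_char t v
        simp only [LF, List.foldl_cons, if_pos hv] at h1 ⊢
        exact h1
      have hNG : NG (v :: t) x.natAbs = NG t (Nat.gcd x.natAbs v.natAbs) := by
        simp [NG, Nat.gcd_comm]
      have hx' : computeGCD x v
          = if 0 < v then ((Int.gcd x v : Nat) : Int) else -((Int.gcd x v : Nat) : Int) := by
        rcases lt_or_gt_of_ne hv with h | h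
        · rw [computeGCD_neg_aux v.natAbs x v le_rfl h, if_neg (by omega)]
        · rw [computeGCD_pos x v h, if_pos h]
      have habs : (computeGCD x v).natAbs = Nat.gcd x.natAbs v.natAbs := by
        rw [hx']; split_ifs <;> simp [Int.gcd]
      rw [ih (computeGCD x v), hLF, habs, hNG]
      by_cases h0 : LF t 0 = 0
      · simp only [if_pos h0]
        rw [if_neg hv, NG_all_zero t _ ((LF_zero_iff t).mp h0), hx']
        rfl
      · simp only [if_neg h0]

theorem computeGCD_eq_one_iff (x y : Int) (hx : x ≠ 1) :
    computeGCD x y = 1 ↔ 0 < y ∧ Nat.gcd x.natAbs y.natAbs = 1 := by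
  rcases lt_trichotomy y 0 with h | h | h
  · rw [computeGCD_neg_aux y.natAbs x y le_rfl h]
    have : (0:Int) ≤ ((Int.gcd x y : Nat) : Int) := by positivity
    constructor
    · intro he; omega
    · intro he; omega
  · subst h; rw [computeGCD_zero_right]
    constructor
    · intro he; exact absurd he hx
    · intro he; omega
  · rw [computeGCD_pos x y h]
    have hg : Int.gcd x y = Nat.gcd x.natAbs y.natAbs := rfl
    rw [hg]
    constructor
    · intro he; exact ⟨h, by exact_mod_cast he⟩
    · intro he; exact_mod_cast he.2

theorem cond_fold (x0 : Int) (r : List Int) :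
    (List.foldl computeGCD x0 r = 1) ↔ NG (x0 :: r) 0 = 1 ∧ 0 < LF (x0 :: r) 0 := by
  have hNG : NG (x0 :: r) 0 = NG r x0.natAbs := by simp [NG]
  have hLF : LF (x0 :: r) 0 = if LF r 0 = 0 then (if x0 ≠ 0 then x0 else 0) else LF r 0 := by
    have h1 : LF (x0 :: r) 0 = LF r (if x0 ≠ 0 then x0 else 0) := by simp [LF]
    rw [h1, LF_char]
  rw [foldA_char, hNG, hLF]
  by_cases h0 : LF r 0 = 0
  · simp only [if_pos h0]
    rw [NG_all_zero r _ ((LF_zero_iff r).mp h0)]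
    rcases eq_or_ne x0 0 with hx | hx
    · simp [hx]
    · simp only [if_pos hx]
      omega
  · simp only [if_neg h0]
    have h1 : (0:Int) ≤ ((NG r x0.natAbs : Nat) : Int) := by positivity
    split_ifs with h
    · constructor
      · intro he
        refine ⟨by exact_mod_cast he, h⟩
      · intro he
        exact_mod_cast he.1
    · constructor
      · intro he; omega
      · intro he
        have : ((NG r x0.natAbs : Nat) : Int) = 1 := by exact_mod_cast he.1
        omega

-- B's fold computes the gcd of the absolute values
theorem bfold : ∀ (t : List Int) (n : Nat),
    t.foldl (fun g v => computeGCD g (v.natAbs : Int)) (n : Int) = ((NG t n : Nat) : Int) := by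
  intro t
  induction t with
  | nil => intro n; rfl
  | cons v t ih =>
    intro n
    simp only [List.foldl_cons, NG] at *
    rw [computeGCD_natCast, Nat.gcd_comm, ih]

theorem B_char (a : List Int) : solve_alt a = if NG a 0 = 1 then "YES" else "NO" := by
  show (if a.foldl (fun g v => computeGCD g (v.natAbs : Int)) 0 = 1 then "YES" else "NO")
      = if NG a 0 = 1 then "YES" else "NO"
  have h0 : ((0:Nat) : Int) = 0 := rfl
  rw [← h0, bfold]
  by_cases h : NG a 0 = 1
  · rw [if_pos h, if_pos (by exact_mod_cast h)]
  · rw [if_neg h, if_neg (by exact_mod_cast h)]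

theorem NG_dvd_init : ∀ (t : List Int) (g : Nat), NG t g ∣ g := by
  intro t
  induction t with
  | nil => intro g; exact dvd_refl g
  | cons v t ih =>
    intro g
    simp only [NG, List.foldl_cons] at *
    exact dvd_trans (ih (Nat.gcd v.natAbs g)) (Nat.gcd_dvd_right _ _)

theorem NG_dvd_mem : ∀ (t : List Int) (g : Nat) (v : Int), v ∈ t → NG t g ∣ v.natAbs := by
  intro t
  induction t with
  | nil => intro g v hv; exact absurd hv (List.not_mem_nil)
  | cons w t ih =>
    intro g v hv
    simp only [NG, List.foldl_cons] at *
    rcases List.mem_cons.mp hv with h | h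
    · subst h
      exact dvd_trans (NG_dvd_init t (Nat.gcd v.natAbs g)) (Nat.gcd_dvd_left _ _)
    · exact ih _ v h

theorem NG_one_of_one_mem (a : List Int) (h : (1:Int) ∈ a) : NG a 0 = 1 :=
  Nat.eq_one_of_dvd_one (by simpa using NG_dvd_mem a 0 1 h)

theorem NG_one_of_pairP (a : List Int) (h : PairP a) : NG a 0 = 1 := by
  obtain ⟨x, hx, y, hy, _, _, hg⟩ := h
  refine Nat.eq_one_of_dvd_one (hg ▸ Nat.dvd_gcd (NG_dvd_mem a 0 x hx) (NG_dvd_mem a 0 y hy))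

theorem one_lt_set_iff (a : List Int) :
    1 < (PySem.Set.ofList a).length ↔ ∃ x ∈ a, ∃ y ∈ a, x ≠ y := by
  have hnd := PySem.Set.nodup_ofList a
  constructor
  · intro h
    rcases hs : PySem.Set.ofList a with _ | ⟨x, _ | ⟨y, t⟩⟩
    · rw [hs] at h; simp at h
    · rw [hs] at h; simp at h
    · rw [hs] at hnd
      have hne : x ≠ y := by
        intro he; subst he
        exact (List.nodup_cons.mp hnd).1 (List.mem_cons_self ..)
      have hx : x ∈ a := (PySem.Set.mem_ofList _ _).mp (hs ▸ List.mem_cons_self ..)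
      have hy : y ∈ a := (PySem.Set.mem_ofList _ _).mp
        (hs ▸ List.mem_cons_of_mem _ (List.mem_cons_self ..))
      exact ⟨x, hx, y, hy, hne⟩
  · rintro ⟨x, hx, y, hy, hne⟩
    have hxs : x ∈ PySem.Set.ofList a := (PySem.Set.mem_ofList _ _).mpr hx
    have hys : y ∈ PySem.Set.ofList a := (PySem.Set.mem_ofList _ _).mpr hy
    rcases hs : PySem.Set.ofList a with _ | ⟨z, _ | ⟨w, t⟩⟩
    · rw [hs] at hxs; exact absurd hxs (List.not_mem_nil)
    · rw [hs] at hxs hys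
      have h1 : x = z := by simpa using hxs
      have h2 : y = z := by simpa using hys
      exact absurd (h1.trans h2.symm) hne
    · simp

theorem A_yes_iff (a : List Int) :
    solve a = "YES" ↔ (∃ x ∈ a, ∃ y ∈ a, x ≠ y) ∧
      ((1:Int) ∈ a ∨ (NG a 0 = 1 ∧ 0 < LF a 0) ∨ PairP a) := by
  by_cases hlen : 1 < (PySem.Set.ofList a).length
  · have hex := (one_lt_set_iff a).mp hlen
    obtain ⟨x, hx, y, hy, hne⟩ := hex
    -- a has at least two elements
    rcases a with _ | ⟨x0, _ | ⟨x1, t⟩⟩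
    · exact absurd hx (List.not_mem_nil)
    · have h1 : x = x0 := by simpa using hx
      have h2 : y = x0 := by simpa using hy
      exact absurd (h1.trans h2.symm) hne
    simp only [solve]
    rw [if_pos hlen]
    by_cases hc : (PySem.Set.ofList (x0 :: x1 :: t)).contains 1 = true
    · rw [if_pos hc]
      have h1 : (1:Int) ∈ (x0 :: x1 :: t) :=
        (PySem.Set.mem_ofList _ _).mp ((PySem.Set.contains_iff _ _).mp hc)
      simp only [true_iff]
      exact ⟨⟨x, hx, y, hy, hne⟩, Or.inl h1⟩
    · rw [if_neg hc]
      have h1m : (1:Int) ∉ (x0 :: x1 :: t) := by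
        intro hmem
        exact hc ((PySem.Set.contains_iff _ _).mpr ((PySem.Set.mem_ofList _ _).mpr hmem))
      have hidx0 : PySem.List.pyGetD (x0 :: x1 :: t) 0 0 = x0 :=
        PySem.List.pyGetD_zero_cons x0 (x1 :: t) 0
      have hidx1 : PySem.List.pyGetD (x0 :: x1 :: t) 1 0 = x1 := by
        have h : ((1:Int)) = ((1:Nat) : Int) := by norm_num
        rw [h, PySem.List.pyGetD_natCast]
        rfl
      have hfold : (PySem.List.pyRange 2 ((x0 :: x1 :: t).length : Int) 1).foldl
          (fun acc i => computeGCD acc (PySem.List.pyGetD (x0 :: x1 :: t) i 0))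
          (computeGCD (PySem.List.pyGetD (x0 :: x1 :: t) 0 0) (PySem.List.pyGetD (x0 :: x1 :: t) 1 0))
          = List.foldl computeGCD x0 (x1 :: t) := by
        rw [hidx0, hidx1]
        rw [PySem.List.foldl_pyRange_pyGetD' (x0 :: x1 :: t) 0 computeGCD (computeGCD x0 x1)
          (by norm_num : (0:Int) ≤ 2)]
        rfl
      rw [hfold]
      have hpair : ((PySem.Set.ofList (x0 :: x1 :: t)).any
          (fun x => (PySem.Set.ofList (x0 :: x1 :: t)).any
            (fun y => decide (x ≠ y) && decide (computeGCD x y = 1))) = true)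
          ↔ PairP (x0 :: x1 :: t) := by
        simp only [List.any_eq_true, Bool.and_eq_true, decide_eq_true_eq]
        constructor
        · rintro ⟨u, hu, v, hv, hne', hg⟩
          have hua : u ∈ (x0 :: x1 :: t) := (PySem.Set.mem_ofList _ _).mp hu
          have hva : v ∈ (x0 :: x1 :: t) := (PySem.Set.mem_ofList _ _).mp hv
          have hu1 : u ≠ 1 := fun he => h1m (he ▸ hua)
          obtain ⟨hv0, hgcd⟩ := (computeGCD_eq_one_iff u v hu1).mp hg
          exact ⟨u, hua, v, hva, hne', hv0, hgcd⟩
        · rintro ⟨u, hu, v, hv, hne', hv0, hgcd⟩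
          have hu1 : u ≠ 1 := fun he => h1m (he ▸ hu)
          exact ⟨u, (PySem.Set.mem_ofList _ _).mpr hu, v, (PySem.Set.mem_ofList _ _).mpr hv,
            hne', (computeGCD_eq_one_iff u v hu1).mpr ⟨hv0, hgcd⟩⟩
      constructor
      · intro h
        refine ⟨⟨x, hx, y, hy, hne⟩, ?_⟩
        by_cases hg1 : List.foldl computeGCD x0 (x1 :: t) = 1
        · exact Or.inr (Or.inl ((cond_fold x0 (x1 :: t)).mp hg1))
        · rw [if_neg hg1] at h
          by_cases hp : (PySem.Set.ofList (x0 :: x1 :: t)).any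
              (fun x => (PySem.Set.ofList (x0 :: x1 :: t)).any
                (fun y => decide (x ≠ y) && decide (computeGCD x y = 1))) = true
          · exact Or.inr (Or.inr (hpair.mp hp))
          · rw [if_neg hp] at h
            exact absurd h (by decide)
      · rintro ⟨-, h | h | h⟩
        · exact absurd h h1m
        · rw [if_pos ((cond_fold x0 (x1 :: t)).mpr h)]
        · by_cases hg1 : List.foldl computeGCD x0 (x1 :: t) = 1
          · rw [if_pos hg1]
          · rw [if_neg hg1, if_pos (hpair.mpr h)]
  · simp only [solve]
    rw [if_neg hlen]
    constructor
    · intro h; exact absurd h (by decide)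
    · rintro ⟨hex, -⟩
      exact absurd ((one_lt_set_iff a).mpr hex) hlen

theorem A_total (a : List Int) : solve a = "YES" ∨ solve a = "NO" := by
  simp only [solve]
  split_ifs <;> simp

theorem unchanged_main (a : List Int) (hD : ¬ D_solve a) : solve a = solve_alt a := by
  rw [D_iff] at hD
  rw [B_char]
  by_cases hg : NG a 0 = 1
  · rw [if_pos hg]
    have hor : ¬ ((∀ x ∈ a, ∀ y ∈ a, x = y) ∨
        ((1:Int) ∉ a ∧ LF a 0 < 0 ∧ ¬ PairP a)) := fun h => hD ⟨hg, h⟩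
    have hne : ¬ ∀ x ∈ a, ∀ y ∈ a, x = y := fun h => hor (Or.inl h)
    have hrest : ∀ _ : (1:Int) ∉ a, ∀ _ : LF a 0 < 0, PairP a := by
      intro h1 hlf
      by_contra hp
      exact hor (Or.inr ⟨h1, hlf, hp⟩)
    push_neg at hne
    obtain ⟨x, hx, y, hy, hxy⟩ := hne
    refine (A_yes_iff a).mpr ⟨⟨x, hx, y, hy, hxy⟩, ?_⟩
    by_cases h1 : (1:Int) ∈ a
    · exact Or.inl h1
    · by_cases hp : PairP a
      · exact Or.inr (Or.inr hp)
      · have hlf' : ¬ LF a 0 < 0 := fun h => hp (hrest h1 h)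
        have hnz : LF a 0 ≠ 0 := by
          intro h0
          have hz := (LF_zero_iff a).mp h0
          rw [NG_all_zero a 0 hz] at hg
          exact absurd hg (by decide)
        exact Or.inr (Or.inl ⟨hg, by omega⟩)
  · rw [if_neg hg]
    rcases A_total a with h | h
    · obtain ⟨-, h1 | h1 | h1⟩ := (A_yes_iff a).mp h
      · exact absurd (NG_one_of_one_mem a h1) hg
      · exact absurd h1.1 hg
      · exact absurd (NG_one_of_pairP a h1) hg
    · exact h

theorem exact_main (a : List Int) (hD : D_solve a) : solve a ≠ solve_alt a := by
  rw [D_iff] at hD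
  obtain ⟨hg, hcase⟩ := hD
  have hB : solve_alt a = "YES" := by rw [B_char, if_pos hg]
  have hA : solve a = "NO" := by
    rcases A_total a with h | h
    · exfalso
      obtain ⟨⟨x, hx, y, hy, hxy⟩, hdisj⟩ := (A_yes_iff a).mp h
      rcases hcase with hall | ⟨h1, hlf, hnp⟩
      · exact hxy ((hall x hx y hy))
      · rcases hdisj with h1' | h1' | h1'
        · exact h1 h1'
        · omega
        · exact hnp h1'
    · exact h
  rw [hA, hB]
  decide

-- ===== VERDICT (by name: the statements are the Claim_ definitions above) =====
theorem solve_spec : Claim_unchanged_solve := by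
  intro a _ hD
  exact unchanged_main a hD

theorem solve_changed : Claim_changed_solve := by
  unfold Claim_changed_solve
  refine ⟨by decide, by decide, ?_, ?_, by decide⟩
  · rcases A_total pvDiffWitness_solve with h | h
    · exfalso
      obtain ⟨-, h1 | h1 | h1⟩ := (A_yes_iff pvDiffWitness_solve).mp h
      · exact absurd h1 (by decide)
      · exact absurd h1 (by decide)
      · exact absurd h1 (by unfold PairP; decide)
    · exact h
  · rw [B_char]
    decide

theorem solve_tight : Claim_exact_solve := by
  intro a _ hD
  exact exact_main a hD
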